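-- pv_equiv track=rewrite | github.com/AidenKim2028/SMC-AD-SRI | SRI/patient_data.py | calc_totalsleepparam
-- ===== SOURCE A (Python) =====
-- def calc_totalsleepparam(tstarray):
--     # calculates TSTparams out from tstarray
--     tst = 0
--     tst_day = 0
--     tst_night = 0
--
--     for i in range(len(tstarray)):
--         tst = tst + tstarray[i]
--         if 10 <= i < 22:
--             tst_day = tst_day + tstarray[i]
--         else:
--             tst_night = tst_night + tstarray[i]
--
--     return [tst, tst_day, tst_night]
-- ===== SOURCE B (Python) =====
-- def calc_totalsleepparam(tstarray):
--     # Total and day-window sums; night derived algebraically as total - day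
--     # (exact: values are integers), so no night accumulator or branch is needed.
--     tst = sum(tstarray)
--     tst_day = sum(tstarray[10:22])
--     return [tst, tst_day, tst - tst_day]
-- ===== Notes on version B (the rewrite author's own statement) =====
-- stated objective: simpler
-- what changed: Drops the night accumulator and the per-index branch: B sums the whole list and the [10:22] day window with builtin sum and derives the night total algebraically as tst - tst_day (exact on integers).
import Mathlib
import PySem

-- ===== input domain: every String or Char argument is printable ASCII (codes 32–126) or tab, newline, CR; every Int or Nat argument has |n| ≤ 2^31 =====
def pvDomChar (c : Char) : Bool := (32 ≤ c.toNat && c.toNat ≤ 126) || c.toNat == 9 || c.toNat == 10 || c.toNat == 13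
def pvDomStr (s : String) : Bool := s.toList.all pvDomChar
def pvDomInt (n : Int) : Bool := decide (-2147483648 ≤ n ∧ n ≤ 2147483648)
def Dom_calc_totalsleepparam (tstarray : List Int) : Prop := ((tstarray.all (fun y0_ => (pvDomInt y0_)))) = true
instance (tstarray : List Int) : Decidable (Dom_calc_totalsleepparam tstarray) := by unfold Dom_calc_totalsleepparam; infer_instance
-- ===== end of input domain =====

-- B drops A's night accumulator and branch: it sums the list and the [10:22] window
-- and derives the night total algebraically as tst - tst_day (exact on integers; simpler).

-- ===== PORT A =====
-- one step of A's for-loop body: add tstarray[i] to tst and to the day or night bucket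
def stepA (tstarray : List Int) (st : Int × Int × Int) (i : Int) : Int × Int × Int :=
  let x := PySem.List.pyGetD tstarray i 0
  let tst := st.1 + x
  if 10 ≤ i ∧ i < 22 then (tst, st.2.1 + x, st.2.2)
  else (tst, st.2.1, st.2.2 + x)

def calc_totalsleepparam (tstarray : List Int) : List Int :=
  let s := (PySem.List.pyRange 0 (tstarray.length : Int) 1).foldl (stepA tstarray) (0, 0, 0)
  [s.1, s.2.1, s.2.2]

-- ===== PORT B =====
def calc_totalsleepparam_alt (tstarray : List Int) : List Int :=
  let tst := tstarray.sum
  let tst_day := (PySem.List.slice tstarray (some 10) (some 22)).sum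
  [tst, tst_day, tst - tst_day]

-- ===== PRECONDITION & SPEC =====
def Spec_calc_totalsleepparam (tstarray : List Int) (out : List Int) : Prop := out = calc_totalsleepparam_alt tstarray
instance (tstarray : List Int) (out : List Int) : Decidable (Spec_calc_totalsleepparam tstarray out) := by unfold Spec_calc_totalsleepparam; infer_instance

-- ===== CLAIM (what is proved, stated in full; the proofs are below) =====
def Claim_equal_calc_totalsleepparam : Prop := ∀ (tstarray : List Int), Dom_calc_totalsleepparam tstarray → Spec_calc_totalsleepparam tstarray (calc_totalsleepparam tstarray)

-- ===== LEMMAS AND PROOFS =====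

-- loop invariant: after processing indices 0..n-1, the state is the three sums over the prefix of length n
lemma stepA_inv (xs : List Int) (n : Nat) (h : n ≤ xs.length) :
    (PySem.List.pyRange 0 (n : Int) 1).foldl (stepA xs) (0, 0, 0)
      = ((xs.take n).sum,
         (((xs.take n).drop 10).take 12).sum,
         ((xs.take n).take 10).sum + ((xs.take n).drop 22).sum) := by
  induction n with
  | zero => simp
  | succ n ih =>
    have hn : n < xs.length := by omega
    have hcast : ((n + 1 : Nat) : Int) = (n : Int) + 1 := by push_cast; ring
    have hget : PySem.List.pyGetD xs (n : Int) 0 = xs[n] := by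
      simp [PySem.List.pyGetD_natCast, List.getD_eq_getElem?_getD, hn]
    have htake : xs.take (n + 1) = xs.take n ++ [xs[n]] := by
      rw [List.take_add_one]; simp [hn]
    rw [hcast, PySem.List.pyRange_one_succ_right (by positivity), List.foldl_append,
        ih (by omega), htake]
    simp only [List.foldl_cons, List.foldl_nil, stepA, hget]
    set x := xs[n] with hx
    set l := xs.take n with hl
    have hlen : l.length = n := by rw [hl]; simp [hn.le]
    by_cases h10 : n < 10
    · rw [if_neg (by omega)]
      have hd : List.drop 10 (l ++ [x]) = [] :=
        List.drop_eq_nil_of_le (by simp [hlen]; omega)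
      have hd' : List.drop 10 l = [] := List.drop_eq_nil_of_le (by omega)
      have ht : List.take 10 (l ++ [x]) = l ++ [x] :=
        List.take_of_length_le (by simp [hlen]; omega)
      have ht' : List.take 10 l = l := List.take_of_length_le (by omega)
      have he : List.drop 22 (l ++ [x]) = [] :=
        List.drop_eq_nil_of_le (by simp [hlen]; omega)
      have he' : List.drop 22 l = [] := List.drop_eq_nil_of_le (by omega)
      simp [hd, hd', ht, ht', he, he']
    · by_cases h22 : n < 22
      · rw [if_pos (by omega)]
        have hd : List.drop 10 (l ++ [x]) = List.drop 10 l ++ [x] :=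
          List.drop_append_of_le_length (by omega)
        have ht12 : List.take 12 (List.drop 10 l ++ [x]) = List.drop 10 l ++ [x] :=
          List.take_of_length_le (by simp [hlen]; omega)
        have ht12' : List.take 12 (List.drop 10 l) = List.drop 10 l :=
          List.take_of_length_le (by simp [hlen]; omega)
        have ht10 : List.take 10 (l ++ [x]) = List.take 10 l :=
          List.take_append_of_le_length (by omega)
        have he : List.drop 22 (l ++ [x]) = [] :=
          List.drop_eq_nil_of_le (by simp [hlen]; omega)
        have he' : List.drop 22 l = [] := List.drop_eq_nil_of_le (by omega)
        simp [hd, ht12, ht12', ht10, he, he']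
      · rw [if_neg (by omega)]
        have hd : List.drop 10 (l ++ [x]) = List.drop 10 l ++ [x] :=
          List.drop_append_of_le_length (by omega)
        have ht12 : List.take 12 (List.drop 10 l ++ [x]) = List.take 12 (List.drop 10 l) :=
          List.take_append_of_le_length (by simp [hlen]; omega)
        have ht10 : List.take 10 (l ++ [x]) = List.take 10 l :=
          List.take_append_of_le_length (by omega)
        have he : List.drop 22 (l ++ [x]) = List.drop 22 l ++ [x] :=
          List.drop_append_of_le_length (by omega)
        simp [hd, ht12, ht10, he, add_assoc]

-- the whole-list sum splits as head (10) + day window (12) + tail (from 22)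
lemma sum_split (xs : List Int) :
    xs.sum = (xs.take 10).sum + ((xs.drop 10).take 12).sum + ((xs.drop 10).drop 12).sum := by
  conv_lhs => rw [← List.take_append_drop 10 xs]
  rw [List.sum_append]
  conv_lhs => rw [← List.take_append_drop 12 (xs.drop 10)]
  rw [List.sum_append]
  ring

-- ===== VERDICT (by name: the statement is the Claim_ definition above) =====
theorem calc_totalsleepparam_spec : Claim_equal_calc_totalsleepparam := by
  intro xs _
  unfold Spec_calc_totalsleepparam calc_totalsleepparam calc_totalsleepparam_alt
  rw [stepA_inv xs xs.length le_rfl]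
  have h1 : PySem.List.slice xs (some 10) (some 22)
      = (xs.drop (10:Int).toNat).take ((22:Int).toNat - (10:Int).toNat) :=
    PySem.List.slice_toNat xs (by norm_num) (by norm_num)
  have hdd : xs.drop 22 = (xs.drop 10).drop 12 := by
    rw [List.drop_drop]
  have h10 : (10:Int).toNat = 10 := by decide
  have h22 : (22:Int).toNat = 22 := by decide
  simp only [List.take_length, h1, hdd, h10, h22]
  norm_num
  rw [hdd]
  have := sum_split xs
  omega
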